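-- pv_equiv track=rewrite | github.com/pyj012/SMART | 서버/testserver.py | contorol_motor
-- ===== SOURCE A (Python) =====
-- STX = 0x02
--
-- ETX = 0x03
--
-- CMD_CONTROL = 0xC0
--
-- def contorol_motor(idList=[],angleList=[]):
--     protocol_arry=[STX]
--     id_len = len(idList)
--     angle_len= len(angleList)*3
--     data_len = id_len+angle_len
--     length_H = (data_len)// 10 + 48
--     length_L = (data_len) % 10 + 48
--     protocol_arry.extend([length_H, length_L, CMD_CONTROL])
--     CRC_SUM = CMD_CONTROL
--     for id_num in range(len(idList)):
--         place100 = angleList[id_num] // 100 + 48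
--         place10  = (angleList[id_num] - (angleList[id_num]//100) * 100) // 10 + 48
--         place1   = angleList[id_num] % 10 + 48
--         protocol_arry.append(idList[id_num]+48)
--         protocol_arry.extend([place100, place10, place1])
--         CRC_SUM += idList[id_num] + 48
--         CRC_SUM = CRC_SUM + place100 + place10 + place1
--
--     CRC_SUM += 0x01
--     CRC_SUM = bin(CRC_SUM)[2:]
--     CRC_H = int(CRC_SUM,2) & 0xff00
--     CRC_H = CRC_H>>8
--     CRC_H = 0xff - CRC_H
--     CRC_L = int(CRC_SUM,2) & 0x00ff
--
--     protocol_arry.extend([CRC_H, CRC_L, ETX])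
--
--     return protocol_arry
-- ===== SOURCE B (Python) =====
-- STX = 0x02
-- ETX = 0x03
-- CMD_CONTROL = 0xC0
--
--
-- def contorol_motor(idList=[], angleList=[]):
--     # Divide-and-conquer: each segment of motors yields (its payload bytes,
--     # their byte-sum); halves are combined by concatenation/addition, the
--     # checksum falls out of the recursion instead of a running accumulator,
--     # and digits come from divmod chains instead of A's explicit formulas.
--     def seg(lo, hi):
--         if hi == lo:
--             return [], 0
--         if hi == lo + 1:
--             q, r = divmod(angleList[lo], 100)
--             t, o = divmod(r, 10)
--             part = [idList[lo] + 48, q + 48, t + 48, o + 48]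
--             return part, sum(part)
--         mid = (lo + hi) // 2
--         lb, ls = seg(lo, mid)
--         rb, rs = seg(mid, hi)
--         return lb + rb, ls + rs
--
--     body, s = seg(0, len(idList))
--     n = len(idList) + 3 * len(angleList)
--     crc = CMD_CONTROL + s + 1
--     return ([STX, n // 10 + 48, n % 10 + 48, CMD_CONTROL]
--             + body
--             + [0xFF - (crc >> 8) % 256, crc % 256, ETX])
-- ===== Notes on version B (the rewrite author's own statement) =====
-- stated objective: alternative
-- what changed: B replaces A's single left-to-right pass with a running (list, CRC) accumulator by a divide-and-conquer recursion over index segments that returns (payload bytes, byte-sum) and combines halves by concatenation/addition, derives the digits by divmod chains instead of A's explicit subtraction formulas, and replaces A's bin()/int(,2) round-trip by plain shift/mod masking.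
import Mathlib
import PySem

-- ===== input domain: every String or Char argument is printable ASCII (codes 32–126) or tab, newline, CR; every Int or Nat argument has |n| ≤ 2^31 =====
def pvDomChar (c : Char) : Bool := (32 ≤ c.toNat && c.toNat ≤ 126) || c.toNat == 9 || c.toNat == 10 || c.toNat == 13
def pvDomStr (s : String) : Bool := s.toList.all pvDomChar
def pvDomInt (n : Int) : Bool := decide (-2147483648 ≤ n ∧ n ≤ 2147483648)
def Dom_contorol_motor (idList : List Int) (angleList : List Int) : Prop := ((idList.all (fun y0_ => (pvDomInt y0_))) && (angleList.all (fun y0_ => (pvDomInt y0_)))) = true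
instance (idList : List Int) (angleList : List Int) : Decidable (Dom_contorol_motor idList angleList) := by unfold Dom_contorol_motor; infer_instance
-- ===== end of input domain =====

-- B builds the payload by a divide-and-conquer recursion over index segments returning
-- (bytes, byte-sum), with divmod digit chains and plain shift/mod masking in place of A's
-- single accumulator pass and its bin()/int(,2) round-trip (objective: alternative).


-- ===== PORT A =====
-- bin(n)[2:] for n ≥ 0, as a list of binary digits (MSB first; bin(0)[2:] = "0").
-- Hand-ported (with pyBitsVal below) because the proof needs the round-trip on a
-- VARIABLE value; exact for n ≥ 0, which Pre_ guarantees.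
def pyBinDigits' : Nat → List Nat
  | 0 => []
  | (n+1) => pyBinDigits' ((n+1) / 2) ++ [(n+1) % 2]
decreasing_by exact Nat.div_lt_self (Nat.succ_pos n) (by norm_num)

def pyBinDigits (n : Nat) : List Nat := if n = 0 then [0] else pyBinDigits' n

-- int(s, 2) on a digit list (never raises on pyBinDigits output)
def pyBitsVal (ds : List Nat) : Nat := ds.foldl (fun a d => a * 2 + d) 0

-- one iteration of A's for-loop over (protocol_arry, CRC_SUM)
def pvStepA (idList : List Int) (angleList : List Int) (st : List Int × Int) (i : Int) : List Int × Int :=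
  -- angleList[id_num] / idList[id_num]: IndexError (pyGet? = none) excluded by Pre_
  let a := (PySem.List.pyGet? angleList i).getD 0
  let place100 := PySem.Int.floordiv a 100 + 48
  let place10 := PySem.Int.floordiv (a - (PySem.Int.floordiv a 100) * 100) 10 + 48
  let place1 := PySem.Int.mod a 10 + 48
  let idv := (PySem.List.pyGet? idList i).getD 0
  (st.1 ++ [idv + 48] ++ [place100, place10, place1],
   st.2 + (idv + 48) + (place100 + place10 + place1))

def contorol_motor (idList : List Int) (angleList : List Int) : List Int :=
  let data_len : Int := (idList.length : Int) + (angleList.length : Int) * 3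
  let length_H := PySem.Int.floordiv data_len 10 + 48
  let length_L := PySem.Int.mod data_len 10 + 48
  -- for id_num in range(len(idList)): state = (protocol_arry, CRC_SUM)
  let st := (PySem.List.pyRange 0 (idList.length : Int) 1).foldl
    (pvStepA idList angleList) ([2, length_H, length_L, 192], 192)
  let CRC_SUM := st.2 + 1
  -- CRC_SUM = bin(CRC_SUM)[2:]; int(CRC_SUM, 2): for CRC_SUM < 0 Python raises
  -- ValueError here (int("b…", 2)) — excluded by Pre_; for CRC_SUM ≥ 0 this is
  -- the digit-list round-trip below.
  let crc2 : Int := (pyBitsVal (pyBinDigits CRC_SUM.toNat) : Int)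
  let CRC_H := 255 - (PySem.Int.band crc2 0xff00) >>> (8 : Nat)
  let CRC_L := PySem.Int.band crc2 0x00ff
  st.1 ++ [CRC_H, CRC_L, 3]

-- ===== PORT B =====
-- seg(lo, hi): (payload bytes, their sum) for motors lo..hi-1, divide and conquer.
-- The 'hi ≤ lo' totality guard is Python's 'hi == lo' leaf (seg is only called with lo ≤ hi).
def pvSeg (idList : List Int) (angleList : List Int) (lo hi : Nat) : List Int × Int :=
  if hi ≤ lo then ([], 0)
  else if hi = lo + 1 then
    let a := (PySem.List.pyGet? angleList (lo : Int)).getD 0   -- IndexError excluded by Pre_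
    let q := PySem.Int.floordiv a 100
    let r := PySem.Int.mod a 100
    let t := PySem.Int.floordiv r 10
    let o := PySem.Int.mod r 10
    let part := [(PySem.List.pyGet? idList (lo : Int)).getD 0 + 48, q + 48, t + 48, o + 48]
    (part, part.sum)
  else
    let mid := (lo + hi) / 2
    let l := pvSeg idList angleList lo mid
    let r := pvSeg idList angleList mid hi
    (l.1 ++ r.1, l.2 + r.2)
termination_by hi - lo
decreasing_by all_goals omega

def contorol_motor_alt (idList : List Int) (angleList : List Int) : List Int :=
  let bs := pvSeg idList angleList 0 idList.length
  let n : Int := (idList.length : Int) + 3 * (angleList.length : Int)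
  let crc := 192 + bs.2 + 1
  [2, PySem.Int.floordiv n 10 + 48, PySem.Int.mod n 10 + 48, 192] ++ bs.1
    ++ [255 - PySem.Int.mod (crc >>> (8 : Nat)) 256, PySem.Int.mod crc 256, 3]

-- ===== PRECONDITION & SPEC =====
-- the id+place bytes one loop iteration contributes to the CRC, minus the four '0' offsets
def pvPlaceSum (a : Int) : Int :=
  PySem.Int.floordiv a 100 + PySem.Int.floordiv (a - (PySem.Int.floordiv a 100) * 100) 10
    + PySem.Int.mod a 10

-- Pre_ excludes exactly the inputs where A raises: IndexError when angleList is shorter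
-- than idList, and ValueError (int('b…', 2) after bin of a negative) when the CRC sum —
-- an arithmetic formula over the inputs — is negative.
def Pre_contorol_motor (idList : List Int) (angleList : List Int) : Prop :=
  idList.length ≤ angleList.length ∧
  0 ≤ 193 + ((idList.zip angleList).map (fun p => p.1 + 192 + pvPlaceSum p.2)).sum

instance (idList : List Int) (angleList : List Int) : Decidable (Pre_contorol_motor idList angleList) := by
  unfold Pre_contorol_motor; infer_instance

def pvWitness_contorol_motor : List Int × List Int := ([1, 2], [123, 45])

def Spec_contorol_motor (idList : List Int) (angleList : List Int) (out : List Int) : Prop := out = contorol_motor_alt idList angleList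
instance (idList : List Int) (angleList : List Int) (out : List Int) : Decidable (Spec_contorol_motor idList angleList out) := by unfold Spec_contorol_motor; infer_instance

-- ===== CLAIM (what is proved, stated in full; the proofs are below) =====
def Claim_equal_contorol_motor : Prop := ∀ (idList : List Int) (angleList : List Int), Dom_contorol_motor idList angleList → Pre_contorol_motor idList angleList → Spec_contorol_motor idList angleList (contorol_motor idList angleList)


-- ===== LEMMAS AND PROOFS =====

-- proof helpers: the 4 bytes of index i in A's formulation, and a contiguous chunk of them
def pvBytes (idList : List Int) (angleList : List Int) (i : Nat) : List Int :=
  let a := (PySem.List.pyGet? angleList (i : Int)).getD 0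
  [(PySem.List.pyGet? idList (i : Int)).getD 0 + 48,
   PySem.Int.floordiv a 100 + 48,
   PySem.Int.floordiv (a - (PySem.Int.floordiv a 100) * 100) 10 + 48,
   PySem.Int.mod a 10 + 48]

def pvChunk (idList : List Int) (angleList : List Int) (lo hi : Nat) : List Int :=
  (List.range' lo (hi - lo)).flatMap (pvBytes idList angleList)

-- A's payload fold stopped after n iterations
def pvBody (idList : List Int) (angleList : List Int) (n : Nat) : List Int :=
  (PySem.List.pyRange 0 (n : Int) 1).foldl
    (fun body i => pvStepA idList angleList (body, 0) i |>.1) []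

theorem pyBinDigits'_val (n : Nat) : ∀ (a : Nat),
    (pyBinDigits' n).foldl (fun a d => a * 2 + d) a = a * 2 ^ (pyBinDigits' n).length + n := by
  induction n using Nat.strong_induction_on with
  | _ n ih =>
    match n with
    | 0 => intro a; simp [pyBinDigits']
    | (m+1) =>
      intro a
      rw [pyBinDigits', List.foldl_append,
        ih ((m+1)/2) (Nat.div_lt_self (Nat.succ_pos m) (by norm_num))]
      simp [List.foldl, pow_succ]
      ring_nf
      omega

theorem pyBits_roundtrip (n : Nat) : pyBitsVal (pyBinDigits n) = n := by
  unfold pyBitsVal pyBinDigits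
  split
  · simp_all [List.foldl]
  · rw [pyBinDigits'_val n 0]; ring

-- B's leaf bytes are A's bytes: divmod(a,100)/divmod(r,10) versus A's explicit formulas
theorem leaf_bytes_eq (idList angleList : List Int) (lo : Nat) :
    [(PySem.List.pyGet? idList (lo : Int)).getD 0 + 48,
     PySem.Int.floordiv ((PySem.List.pyGet? angleList (lo : Int)).getD 0) 100 + 48,
     PySem.Int.floordiv (PySem.Int.mod ((PySem.List.pyGet? angleList (lo : Int)).getD 0) 100) 10 + 48,
     PySem.Int.mod (PySem.Int.mod ((PySem.List.pyGet? angleList (lo : Int)).getD 0) 100) 10 + 48]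
    = pvBytes idList angleList lo := by
  set a := (PySem.List.pyGet? angleList (lo : Int)).getD 0 with ha
  have hm : PySem.Int.mod a 100 = a - PySem.Int.floordiv a 100 * 100 := by
    have := PySem.Int.floordiv_mul_add_mod a 100; omega
  have ho : PySem.Int.mod (PySem.Int.mod a 100) 10 = PySem.Int.mod a 10 := by
    rw [PySem.Int.mod_eq_emod_of_pos (by norm_num), PySem.Int.mod_eq_emod_of_pos (by norm_num),
      PySem.Int.mod_eq_emod_of_pos (by norm_num), Int.emod_emod_of_dvd a (by norm_num)]
  rw [ho, hm]; rfl

-- B's recursion computes the chunk of A-formula bytes and its sum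
theorem seg_eq (idList angleList : List Int) : ∀ (k lo hi : Nat), hi - lo ≤ k → lo ≤ hi →
    pvSeg idList angleList lo hi
    = (pvChunk idList angleList lo hi, (pvChunk idList angleList lo hi).sum) := by
  intro k
  induction k with
  | zero =>
    intro lo hi h1 h2
    have : hi = lo := by omega
    subst this
    rw [pvSeg]
    simp [pvChunk]
  | succ k ih =>
    intro lo hi h1 h2
    rw [pvSeg]
    by_cases h0 : hi ≤ lo
    · have : hi = lo := by omega
      subst this; simp [pvChunk]
    · simp only [h0, if_false]
      by_cases h11 : hi = lo + 1
      · subst h11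
        simp only [if_true]
        have : pvChunk idList angleList lo (lo + 1) = pvBytes idList angleList lo := by
          simp [pvChunk, List.range'_one]
        rw [this, ← leaf_bytes_eq idList angleList lo]
      · simp only [h11, if_false]
        have hmidl : lo ≤ (lo + hi) / 2 := by omega
        have hmidr : (lo + hi) / 2 ≤ hi := by omega
        rw [ih lo ((lo + hi) / 2) (by omega) hmidl, ih ((lo + hi) / 2) hi (by omega) hmidr]
        have hsplit : pvChunk idList angleList lo hi
            = pvChunk idList angleList lo ((lo + hi) / 2)
              ++ pvChunk idList angleList ((lo + hi) / 2) hi := by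
          unfold pvChunk
          rw [← List.flatMap_append]
          congr 1
          have := @List.range'_append lo ((lo + hi) / 2 - lo) (hi - (lo + hi) / 2) 1
          simp only [one_mul] at this
          rw [show lo + ((lo + hi) / 2 - lo) = (lo + hi) / 2 by omega] at this
          rw [show (lo + hi) / 2 - lo + (hi - (lo + hi) / 2) = hi - lo by omega] at this
          exact this.symm
        rw [hsplit]
        simp [List.sum_append]

-- A's loop: the fold result is header ++ chunk, CRC accumulator = 192 + chunk sum,
-- and the chunk sum equals the zip formula Pre_ speaks about
theorem loop_eq (idList angleList : List Int) (hdr : List Int) : ∀ (n : Nat), n ≤ idList.length → n ≤ angleList.length →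
    (PySem.List.pyRange 0 (n : Int) 1).foldl (pvStepA idList angleList) (hdr, 192)
    = (hdr ++ pvChunk idList angleList 0 n, 192 + (pvChunk idList angleList 0 n).sum)
    ∧ (pvChunk idList angleList 0 n).sum
      = (((idList.zip angleList).take n).map (fun p => p.1 + 192 + pvPlaceSum p.2)).sum := by
  intro n
  induction n with
  | zero => intro _ _; simp [pvChunk]
  | succ n ih =>
    intro h1 h2
    obtain ⟨ihA, ihS⟩ := ih (by omega) (by omega)
    have hzlen : n < (idList.zip angleList).length := by simp [List.length_zip]; omega
    have hrange : PySem.List.pyRange 0 ((n + 1 : Nat) : Int) 1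
        = PySem.List.pyRange 0 (n : Int) 1 ++ [(n : Int)] := by
      rw [show ((n + 1 : Nat) : Int) = (n : Int) + 1 by push_cast; ring]
      exact PySem.List.pyRange_one_succ_right (by positivity)
    have hchunk : pvChunk idList angleList 0 (n + 1)
        = pvChunk idList angleList 0 n ++ pvBytes idList angleList n := by
      unfold pvChunk
      simp only [Nat.sub_zero, List.range'_concat, List.flatMap_append]
      simp
    have htake : (idList.zip angleList).take (n+1)
        = (idList.zip angleList).take n ++ [(idList[n]'(by omega), angleList[n]'(by omega))] := by
      rw [List.take_succ_eq_append_getElem hzlen, List.getElem_zip]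
    have hna : n < angleList.length := by omega
    have hni : n < idList.length := by omega
    have hga : angleList[n]? = some (angleList[n]'hna) := List.getElem?_eq_getElem hna
    have hgi : idList[n]? = some (idList[n]'hni) := List.getElem?_eq_getElem hni
    constructor
    · rw [hrange, List.foldl_append, ihA, hchunk]
      simp only [List.foldl, pvStepA, Prod.mk.injEq]
      constructor
      · simp [pvBytes, hga, List.append_assoc]
      · rw [List.sum_append]
        simp [pvBytes, hga, List.sum_cons]
        ring
    · rw [hchunk, htake, List.sum_append, List.map_append, List.sum_append, ihS]
      simp [pvBytes, pvPlaceSum, hga, hgi, List.sum_cons]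
      ring

theorem crcH_eq (c : Int) (h : 0 ≤ c) :
    (PySem.Int.band ((pyBitsVal (pyBinDigits c.toNat) : Nat) : Int) 0xff00) >>> (8 : Nat)
      = PySem.Int.mod (c >>> (8 : Nat)) 256 := by
  rw [pyBits_roundtrip]
  obtain ⟨m, rfl⟩ := Int.eq_ofNat_of_zero_le h
  rw [Int.toNat_natCast]
  rw [show ((m : Int) >>> (8 : Nat)) = ((m >>> 8 : Nat) : Int) from Int.mem_toNat?.mp rfl,
    show (256 : Int) = ((256 : Nat) : Int) by norm_num, PySem.Int.mod_natCast,
    show (0xff00 : Int) = ((0xff00 : Nat) : Int) by norm_num,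
    PySem.Int.band_natCast,
    show ((m &&& 0xff00 : Nat) : Int) >>> (8 : Nat) = ((m &&& 0xff00) >>> 8 : Nat) from
      Int.mem_toNat?.mp rfl]
  norm_cast
  rw [Nat.shiftRight_and_distrib]
  have h255 : (65280 : Nat) >>> 8 = 255 := by decide
  rw [h255]
  have := Nat.and_two_pow_sub_one_eq_mod (m >>> 8) 8
  norm_num at this
  exact this

theorem crcL_eq (c : Int) (h : 0 ≤ c) :
    PySem.Int.band ((pyBitsVal (pyBinDigits c.toNat) : Nat) : Int) 0x00ff
      = PySem.Int.mod c 256 := by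
  rw [pyBits_roundtrip]
  obtain ⟨m, rfl⟩ := Int.eq_ofNat_of_zero_le h
  rw [Int.toNat_natCast,
    show (0x00ff : Int) = ((0x00ff : Nat) : Int) by norm_num,
    PySem.Int.band_natCast,
    show (256 : Int) = ((256 : Nat) : Int) by norm_num, PySem.Int.mod_natCast]
  norm_cast
  have := Nat.and_two_pow_sub_one_eq_mod m 8
  norm_num at this
  exact this

-- ===== VERDICT (by name: the statement is the Claim_ definition above) =====
theorem contorol_motor_spec : Claim_equal_contorol_motor := by
  intro idList angleList _ hpre
  unfold Pre_contorol_motor at hpre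
  obtain ⟨hlen, hcrc⟩ := hpre
  unfold Spec_contorol_motor contorol_motor contorol_motor_alt
  dsimp only
  obtain ⟨hA, hS⟩ := loop_eq idList angleList
    [2, PySem.Int.floordiv ((idList.length : Int) + (angleList.length : Int) * 3) 10 + 48,
     PySem.Int.mod ((idList.length : Int) + (angleList.length : Int) * 3) 10 + 48, 192]
    idList.length le_rfl hlen
  have htake : (idList.zip angleList).take idList.length = idList.zip angleList :=
    List.take_of_length_le (by simp [List.length_zip])
  rw [htake] at hS
  have hmul : (angleList.length : Int) * 3 = 3 * (angleList.length : Int) := by ring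
  have hcrc' : 0 ≤ 192 + (pvChunk idList angleList 0 idList.length).sum + 1 := by
    rw [hS]; omega
  rw [seg_eq idList angleList idList.length 0 idList.length (by omega) (by omega)]
  rw [hA]
  simp only [hmul]
  rw [crcH_eq _ hcrc', crcL_eq _ hcrc']
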